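-- pv_equiv track=rewrite | github.com/danitbensimon/competitor-discovery | score.py | best_confidence
-- ===== SOURCE A (Python) =====
-- def best_confidence(confidence_values):
--     normalized = [str(c).strip().lower() for c in confidence_values if c]
--     if "high" in normalized:
--         return "high"
--     if "medium" in normalized:
--         return "medium"
--     if "low" in normalized:
--         return "low"
--     return "unknown"
-- ===== SOURCE B (Python) =====
-- _RANK = {"high": 3, "medium": 2, "low": 1}
-- _LABEL = {3: "high", 2: "medium", 1: "low"}
--
-- def best_confidence(confidence_values):
--     best = 0
--     for c in confidence_values:
--         if c:
--             r = _RANK.get(str(c).strip().lower(), 0)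
--             if r > best:
--                 best = r
--     return _LABEL.get(best, "unknown")
-- ===== Notes on version B (the rewrite author's own statement) =====
-- stated objective: simpler
-- what changed: Replaces building a normalized list and scanning it three times with a single pass that keeps the maximum priority rank via a ranking dict, mapping the best rank back to its label at the end.
import Mathlib
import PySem

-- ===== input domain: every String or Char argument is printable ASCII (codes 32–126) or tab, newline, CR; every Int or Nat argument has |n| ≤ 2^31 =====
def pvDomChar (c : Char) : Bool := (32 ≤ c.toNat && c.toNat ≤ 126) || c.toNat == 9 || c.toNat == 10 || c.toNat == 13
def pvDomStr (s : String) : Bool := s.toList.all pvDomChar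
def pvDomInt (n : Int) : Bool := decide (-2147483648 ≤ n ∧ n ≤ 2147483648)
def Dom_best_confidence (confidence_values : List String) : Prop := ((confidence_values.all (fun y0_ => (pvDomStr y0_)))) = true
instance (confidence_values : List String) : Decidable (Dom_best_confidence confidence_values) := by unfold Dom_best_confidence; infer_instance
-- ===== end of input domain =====

-- B replaces A's normalized-list construction and three ordered membership scans
-- by a single pass keeping the maximum priority rank (objective: simpler).


-- ===== PORT A =====
def best_confidence (confidence_values : List String) : String :=
  let normalized := (confidence_values.filter (fun c => c ≠ "")).map
      (fun c => PySem.Str.lower (PySem.Str.strip c))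
  if normalized.contains "high" then "high"
  else if normalized.contains "medium" then "medium"
  else if normalized.contains "low" then "low"
  else "unknown"

-- ===== PORT B =====
-- _RANK.get(s, 0)
def pvRankOf (s : String) : Nat :=
  if s = "high" then 3 else if s = "medium" then 2 else if s = "low" then 1 else 0

-- _LABEL.get(best, "unknown")
def pvLabelOf : Nat → String
  | 3 => "high"
  | 2 => "medium"
  | 1 => "low"
  | _ => "unknown"

def best_confidence_alt (confidence_values : List String) : String :=
  pvLabelOf (confidence_values.foldl
    (fun best c =>
      if c ≠ "" then
        let r := pvRankOf (PySem.Str.lower (PySem.Str.strip c))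
        if r > best then r else best
      else best) 0)

-- ===== PRECONDITION & SPEC =====
def Spec_best_confidence (confidence_values : List String) (out : String) : Prop := out = best_confidence_alt confidence_values
instance (confidence_values : List String) (out : String) : Decidable (Spec_best_confidence confidence_values out) := by unfold Spec_best_confidence; infer_instance

-- ===== CLAIM (what is proved, stated in full; the proofs are below) =====
def Claim_equal_best_confidence : Prop := ∀ (confidence_values : List String), Dom_best_confidence confidence_values → Spec_best_confidence confidence_values (best_confidence confidence_values)

-- ===== LEMMAS AND PROOFS =====

/-- maximum rank of a list of normalized strings -/
def pvMaxRank (l : List String) : Nat := l.foldr (fun x a => max (pvRankOf x) a) 0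

theorem pvRankOf_le (s : String) : pvRankOf s ≤ 3 := by
  unfold pvRankOf; split_ifs <;> omega

theorem pvRankOf_le2 (s : String) (h : s ≠ "high") : pvRankOf s ≤ 2 := by
  unfold pvRankOf; split_ifs <;> simp_all

theorem pvRankOf_le1 (s : String) (h1 : s ≠ "high") (h2 : s ≠ "medium") : pvRankOf s ≤ 1 := by
  unfold pvRankOf; split_ifs <;> simp_all

theorem pvRankOf_eq0 (s : String) (h1 : s ≠ "high") (h2 : s ≠ "medium") (h3 : s ≠ "low") :
    pvRankOf s = 0 := by
  unfold pvRankOf; split_ifs <;> simp_all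

theorem pvMaxRank_cons (x : String) (l : List String) :
    pvMaxRank (x :: l) = max (pvRankOf x) (pvMaxRank l) := rfl

theorem pvMaxRank_le3 (l : List String) : pvMaxRank l ≤ 3 := by
  induction l with
  | nil => simp [pvMaxRank]
  | cons x l ih => rw [pvMaxRank_cons]; exact max_le (pvRankOf_le x) ih

theorem pvMaxRank_le2 (l : List String) (h : "high" ∉ l) : pvMaxRank l ≤ 2 := by
  induction l with
  | nil => simp [pvMaxRank]
  | cons x l ih =>
    simp only [List.mem_cons, not_or] at h
    rw [pvMaxRank_cons]
    exact max_le (pvRankOf_le2 x (fun hx => h.1 hx.symm)) (ih h.2)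

theorem pvMaxRank_le1 (l : List String) (h1 : "high" ∉ l) (h2 : "medium" ∉ l) :
    pvMaxRank l ≤ 1 := by
  induction l with
  | nil => simp [pvMaxRank]
  | cons x l ih =>
    simp only [List.mem_cons, not_or] at h1 h2
    rw [pvMaxRank_cons]
    exact max_le (pvRankOf_le1 x (fun hx => h1.1 hx.symm) (fun hx => h2.1 hx.symm))
      (ih h1.2 h2.2)

theorem pvMaxRank_eq0 (l : List String) (h1 : "high" ∉ l) (h2 : "medium" ∉ l)
    (h3 : "low" ∉ l) : pvMaxRank l = 0 := by
  induction l with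
  | nil => simp [pvMaxRank]
  | cons x l ih =>
    simp only [List.mem_cons, not_or] at h1 h2 h3
    rw [pvMaxRank_cons,
      pvRankOf_eq0 x (fun hx => h1.1 hx.symm) (fun hx => h2.1 hx.symm) (fun hx => h3.1 hx.symm),
      ih h1.2 h2.2 h3.2]
    rfl

theorem pvMaxRank_of_mem {l : List String} {s : String} (h : s ∈ l) :
    pvRankOf s ≤ pvMaxRank l := by
  induction l with
  | nil => simp at h
  | cons x l ih =>
    rw [pvMaxRank_cons]
    rcases List.mem_cons.mp h with h | h
    · subst h; exact Nat.le_max_left _ _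
    · exact le_trans (ih h) (Nat.le_max_right _ _)

/-- A's if-chain on the normalized list equals the label of its maximum rank. -/
theorem chain_eq_label (l : List String) :
    (if l.contains "high" then "high"
     else if l.contains "medium" then "medium"
     else if l.contains "low" then "low"
     else "unknown") = pvLabelOf (pvMaxRank l) := by
  simp only [List.contains_eq_mem, decide_eq_true_eq]
  by_cases h1 : "high" ∈ l
  · have h := pvMaxRank_of_mem h1
    have h3 : pvMaxRank l = 3 := le_antisymm (pvMaxRank_le3 l) (by simpa [pvRankOf] using h)
    simp [h1, h3, pvLabelOf]
  · by_cases h2 : "medium" ∈ l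
    · have h := pvMaxRank_of_mem h2
      have hm : pvMaxRank l = 2 :=
        le_antisymm (pvMaxRank_le2 l h1) (by simpa [pvRankOf] using h)
      simp [h1, h2, hm, pvLabelOf]
    · by_cases h3 : "low" ∈ l
      · have h := pvMaxRank_of_mem h3
        have hl : pvMaxRank l = 1 :=
          le_antisymm (pvMaxRank_le1 l h1 h2) (by simpa [pvRankOf] using h)
        simp [h1, h2, h3, hl, pvLabelOf]
      · simp [h1, h2, h3, pvMaxRank_eq0 l h1 h2 h3, pvLabelOf]

/-- B's single fold computes the max of the accumulator and the max rank of A's normalized list. -/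
theorem foldl_eq_maxRank (vs : List String) (b : Nat) :
    vs.foldl
      (fun best c =>
        if c ≠ "" then
          let r := pvRankOf (PySem.Str.lower (PySem.Str.strip c))
          if r > best then r else best
        else best) b
    = max b (pvMaxRank ((vs.filter (fun c => c ≠ "")).map
        (fun c => PySem.Str.lower (PySem.Str.strip c)))) := by
  induction vs generalizing b with
  | nil => simp [pvMaxRank]
  | cons x vs ih =>
    rw [List.foldl_cons]
    by_cases hx : x = ""
    · rw [if_neg (by simp [hx]), ih]
      congr 2
      simp [hx]
    · rw [if_pos hx, ih]
      have hf : ((x :: vs).filter (fun c => c ≠ "")).map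
            (fun c => PySem.Str.lower (PySem.Str.strip c))
          = PySem.Str.lower (PySem.Str.strip x) ::
            (vs.filter (fun c => c ≠ "")).map (fun c => PySem.Str.lower (PySem.Str.strip c)) := by
        simp [hx]
      rw [hf, pvMaxRank_cons]
      have hstep : (if pvRankOf (PySem.Str.lower (PySem.Str.strip x)) > b
              then pvRankOf (PySem.Str.lower (PySem.Str.strip x)) else b)
            = max b (pvRankOf (PySem.Str.lower (PySem.Str.strip x))) := by
        split_ifs with h <;> omega
      rw [hstep, Nat.max_assoc]

-- ===== VERDICT (by name: the statement is the Claim_ definition above) =====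
theorem best_confidence_spec : Claim_equal_best_confidence := by
  intro vs _
  unfold Spec_best_confidence best_confidence best_confidence_alt
  rw [foldl_eq_maxRank, Nat.zero_max]
  exact chain_eq_label _
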